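-- pv_equiv track=rewrite | github.com/Ashmit-299/Ai-Agent | fix_indexes_safe.py | find_redundant_indexes
-- ===== SOURCE A (Python) =====
-- def find_redundant_indexes(indexes):
--     """Find truly redundant indexes (same table, same columns)"""
--
--     # Group by table and column pattern
--     table_columns = {}
--     redundant = []
--
--     for schema, table, index_name, index_def, has_constraint in indexes:
--         if has_constraint:
--             continue  # Skip constraint-supporting indexes
--
--         # Extract columns from index definition
--         if 'USING btree (' in index_def:
--             columns = index_def.split('USING btree (')[1].split(')')[0].strip()
--
--             key = f"{table}:{columns}"
--             if key in table_columns: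
--                 redundant.append((table, index_name, columns, table_columns[key]))
--             else:
--                 table_columns[key] = index_name
--
--     return redundant
-- ===== SOURCE B (Python) =====
-- def find_redundant_indexes(indexes):
--     """Find truly redundant indexes (same table, same columns)"""
--
--     def parse(index_def):
--         if 'USING btree (' not in index_def:
--             return None
--         return index_def.split('USING btree (')[1].split(')')[0].strip()
--
--     # Pass 1: record the first position and index name for each table:columns key.
--     first = {}
--     for pos, (schema, table, index_name, index_def, has_constraint) in enumerate(indexes):
--         if has_constraint:
--             continue
--         columns = parse(index_def)
--         if columns is None:
--             continue
--         key = f"{table}:{columns}"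
--         if key not in first:
--             first[key] = (pos, index_name)
--
--     # Pass 2: every later entry with an already-recorded key is redundant.
--     redundant = []
--     for pos, (schema, table, index_name, index_def, has_constraint) in enumerate(indexes):
--         if has_constraint:
--             continue
--         columns = parse(index_def)
--         if columns is None:
--             continue
--         key = f"{table}:{columns}"
--         fpos, fname = first[key]
--         if fpos != pos:
--             redundant.append((table, index_name, columns, fname))
--     return redundant
-- ===== Notes on version B (the rewrite author's own statement) =====
-- stated objective: alternative
-- what changed: A's single pass that mutates a key->first-name dict and appends on the fly is replaced by two passes: pass 1 records the first position and index name per table:columns key, pass 2 re-scans in original order and emits every entry whose position is not that first position.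
import Mathlib
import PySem

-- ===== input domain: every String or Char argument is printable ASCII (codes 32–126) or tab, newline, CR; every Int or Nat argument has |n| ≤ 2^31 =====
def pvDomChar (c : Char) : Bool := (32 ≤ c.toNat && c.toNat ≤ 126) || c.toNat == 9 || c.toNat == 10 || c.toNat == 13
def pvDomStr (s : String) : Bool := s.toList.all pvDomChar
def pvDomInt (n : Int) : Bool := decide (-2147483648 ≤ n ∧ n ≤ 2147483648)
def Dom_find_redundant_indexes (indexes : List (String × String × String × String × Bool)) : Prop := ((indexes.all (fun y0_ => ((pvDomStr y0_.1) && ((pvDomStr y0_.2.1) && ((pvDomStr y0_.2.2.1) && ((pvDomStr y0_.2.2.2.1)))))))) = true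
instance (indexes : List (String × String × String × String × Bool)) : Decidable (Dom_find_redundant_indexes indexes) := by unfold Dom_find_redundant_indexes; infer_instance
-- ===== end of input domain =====

-- B replaces A's single pass with mutable first-seen dict by two passes (record first position+name per
-- table:columns key, then emit every non-first entry in original order) — objective: alternative decomposition.

-- ===== PORT A =====
def find_redundant_indexes (indexes : List (String × String × String × String × Bool)) : List (String × String × String × String) :=
  (indexes.foldl
    (fun (st : PySem.Dict String String × List (String × String × String × String)) x =>
      let (_schema, table, index_name, index_def, has_constraint) := x
      if has_constraint then st
      else if PySem.Str.isIn "USING btree (" index_def then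
        let columns := PySem.Str.strip
          (((PySem.Str.split? (((PySem.Str.split? index_def "USING btree (").getD [])[1]?.getD "") ")").getD [])[0]?.getD "")
        let key := table ++ ":" ++ columns
        if st.1.contains key then
          (st.1, st.2 ++ [(table, index_name, columns, st.1.getD key "")])
        else
          (st.1.insert key index_name, st.2)
      else st)
    (PySem.Dict.empty, [])).2

-- ===== PORT B =====
-- parse helper of Source B
def pvParse (index_def : String) : Option String :=
  if PySem.Str.isIn "USING btree (" index_def then
    some (PySem.Str.strip
      (((PySem.Str.split? (((PySem.Str.split? index_def "USING btree (").getD [])[1]?.getD "") ")").getD [])[0]?.getD ""))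
  else none

def find_redundant_indexes_alt (indexes : List (String × String × String × String × Bool)) : List (String × String × String × String) :=
  -- pass 1: first position and index name per key
  let first : PySem.Dict String (Int × String) :=
    (PySem.List.enumerate indexes 0).foldl
      (fun (F : PySem.Dict String (Int × String)) px =>
        let (pos, _schema, table, index_name, index_def, has_constraint) := px
        if has_constraint then F
        else
          match pvParse index_def with
          | none => F
          | some columns =>
            let key := table ++ ":" ++ columns
            if F.contains key then F else F.insert key (pos, index_name))
      PySem.Dict.empty
  -- pass 2: emit non-first entries in original order
  (PySem.List.enumerate indexes 0).foldl
    (fun (acc : List (String × String × String × String)) px =>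
      let (pos, _schema, table, index_name, index_def, has_constraint) := px
      if has_constraint then acc
      else
        match pvParse index_def with
        | none => acc
        | some columns =>
          let key := table ++ ":" ++ columns
          let f := first.getD key (0, "")
          if f.1 ≠ pos then acc ++ [(table, index_name, columns, f.2)] else acc)
    []

-- ===== PRECONDITION & SPEC =====
def Spec_find_redundant_indexes (indexes : List (String × String × String × String × Bool)) (out : List (String × String × String × String)) : Prop := out = find_redundant_indexes_alt indexes
instance (indexes : List (String × String × String × String × Bool)) (out : List (String × String × String × String)) : Decidable (Spec_find_redundant_indexes indexes out) := by unfold Spec_find_redundant_indexes; infer_instance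

-- ===== CLAIM (what is proved, stated in full; the proofs are below) =====
def Claim_equal_find_redundant_indexes : Prop := ∀ (indexes : List (String × String × String × String × Bool)), Dom_find_redundant_indexes indexes → Spec_find_redundant_indexes indexes (find_redundant_indexes indexes)

-- ===== LEMMAS AND PROOFS =====

-- the (table, index_name, columns) data of a non-skipped entry
def pvInfo (x : String × String × String × String × Bool) : Option (String × String × String) :=
  if x.2.2.2.2 then none else (pvParse x.2.2.2.1).map (fun c => (x.2.1, x.2.2.1, c))

def pvInfoE (px : Int × (String × String × String × String × Bool)) :
    Option (Int × (String × String × String)) :=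
  (pvInfo px.2).map (fun y => (px.1, y))

def pvKey (y : String × String × String) : String := y.1 ++ ":" ++ y.2.2

def pvStepA (st : PySem.Dict String String × List (String × String × String × String))
    (y : String × String × String) :
    PySem.Dict String String × List (String × String × String × String) :=
  if st.1.contains (pvKey y) then
    (st.1, st.2 ++ [(y.1, y.2.1, y.2.2, st.1.getD (pvKey y) "")])
  else (st.1.insert (pvKey y) y.2.1, st.2)

def pvStepF (F : PySem.Dict String (Int × String)) (q : Int × (String × String × String)) :
    PySem.Dict String (Int × String) :=
  if F.contains (pvKey q.2) then F else F.insert (pvKey q.2) (q.1, q.2.2.1)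

def pvGoA : List (String × String × String) → PySem.Dict String String →
    List (String × String × String × String)
  | [], _ => []
  | y :: tl, d =>
    if d.contains (pvKey y) then (y.1, y.2.1, y.2.2, d.getD (pvKey y) "") :: pvGoA tl d
    else pvGoA tl (d.insert (pvKey y) y.2.1)

def pvGoB (F : PySem.Dict String (Int × String)) :
    List (Int × (String × String × String)) → List (String × String × String × String)
  | [] => []
  | q :: tl =>
    if (F.getD (pvKey q.2) (0, "")).1 ≠ q.1 then
      (q.2.1, q.2.2.1, q.2.2.2, (F.getD (pvKey q.2) (0, "")).2) :: pvGoB F tl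
    else pvGoB F tl

def pvFirstOcc : List (Int × (String × String × String)) → String → Option (Int × String)
  | [], _ => none
  | q :: tl, k => if pvKey q.2 = k then some (q.1, q.2.2.1) else pvFirstOcc tl k

-- the invariant relating A's running dict d to B's completed first-pass dict F on the remaining list
def pvInv (d : PySem.Dict String String) (F : PySem.Dict String (Int × String))
    (es : List (Int × (String × String × String))) : Prop :=
  ∀ k, match d.get? k with
  | some nm => ∃ p0, F.get? k = some (p0, nm) ∧ ∀ q ∈ es, pvKey q.2 = k → q.1 ≠ p0
  | none => F.get? k = pvFirstOcc es k

-- A's raw loop is the pvStepA fold over the parsed entries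
theorem pv_foldA_eq (l : List (String × String × String × String × Bool))
    (st : PySem.Dict String String × List (String × String × String × String)) :
    l.foldl
      (fun (st : PySem.Dict String String × List (String × String × String × String)) x =>
        let (_schema, table, index_name, index_def, has_constraint) := x
        if has_constraint then st
        else if PySem.Str.isIn "USING btree (" index_def then
          let columns := PySem.Str.strip
            (((PySem.Str.split? (((PySem.Str.split? index_def "USING btree (").getD [])[1]?.getD "") ")").getD [])[0]?.getD "")
          let key := table ++ ":" ++ columns
          if st.1.contains key then
            (st.1, st.2 ++ [(table, index_name, columns, st.1.getD key "")])
          else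
            (st.1.insert key index_name, st.2)
        else st) st
    = (l.filterMap pvInfo).foldl pvStepA st := by
  induction l generalizing st with
  | nil => rfl
  | cons x tl ih =>
    obtain ⟨s, t, n, df, hc⟩ := x
    cases hc with
    | true => simpa [pvInfo] using ih _
    | false =>
      by_cases h : PySem.Str.isIn "USING btree (" df = true
      · simp only [List.foldl_cons, pvInfo, pvParse, h, if_true, if_false, Bool.false_eq_true,
          List.filterMap_cons, Option.map_some]
        rw [ih]
        rfl
      · simp only [Bool.not_eq_true] at h
        simp only [List.foldl_cons, pvInfo, pvParse, h, Bool.false_eq_true, if_false,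
          List.filterMap_cons, Option.map_none]
        exact ih _

-- the pvStepA fold, in terms of pvGoA
theorem pv_goA_eq (ys : List (String × String × String)) (d : PySem.Dict String String)
    (r : List (String × String × String × String)) :
    (ys.foldl pvStepA (d, r)).2 = r ++ pvGoA ys d := by
  induction ys generalizing d r with
  | nil => simp [pvGoA]
  | cons y tl ih =>
    by_cases h : d.contains (pvKey y) = true
    · simp [pvStepA, h, pvGoA, ih]
    · simp only [Bool.not_eq_true] at h
      simp [pvStepA, h, pvGoA, ih]

-- B's pass-1 loop is the pvStepF fold over the parsed enumerated entries
theorem pv_foldF_eq (l : List (Int × (String × String × String × String × Bool)))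
    (F : PySem.Dict String (Int × String)) :
    l.foldl
      (fun (F : PySem.Dict String (Int × String)) px =>
        let (pos, _schema, table, index_name, index_def, has_constraint) := px
        if has_constraint then F
        else
          match pvParse index_def with
          | none => F
          | some columns =>
            let key := table ++ ":" ++ columns
            if F.contains key then F else F.insert key (pos, index_name)) F
    = (l.filterMap pvInfoE).foldl pvStepF F := by
  induction l generalizing F with
  | nil => rfl
  | cons px tl ih =>
    obtain ⟨p, s, t, n, df, hc⟩ := px
    cases hc with
    | true => simpa [pvInfoE, pvInfo] using ih _
    | false =>
      cases h : pvParse df with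
      | none =>
        simp only [List.foldl_cons, pvInfoE, pvInfo, h, Bool.false_eq_true, if_false,
          Option.map_none, List.filterMap_cons]
        exact ih _
      | some c =>
        simp only [List.foldl_cons, pvInfoE, pvInfo, h, Bool.false_eq_true, if_false,
          Option.map_some, List.filterMap_cons]
        rw [ih]
        rfl

-- B's pass-2 loop, in terms of pvGoB
theorem pv_foldB2_eq (F : PySem.Dict String (Int × String))
    (l : List (Int × (String × String × String × String × Bool)))
    (acc : List (String × String × String × String)) :
    l.foldl
      (fun (acc : List (String × String × String × String)) px =>
        let (pos, _schema, table, index_name, index_def, has_constraint) := px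
        if has_constraint then acc
        else
          match pvParse index_def with
          | none => acc
          | some columns =>
            let key := table ++ ":" ++ columns
            let f := F.getD key (0, "")
            if f.1 ≠ pos then acc ++ [(table, index_name, columns, f.2)] else acc) acc
    = acc ++ pvGoB F (l.filterMap pvInfoE) := by
  induction l generalizing acc with
  | nil => simp [pvGoB]
  | cons px tl ih =>
    obtain ⟨p, s, t, n, df, hc⟩ := px
    cases hc with
    | true => simpa [pvInfoE, pvInfo] using ih _
    | false =>
      cases h : pvParse df with
      | none =>
        simp only [List.foldl_cons, pvInfoE, pvInfo, h, Bool.false_eq_true, if_false,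
          Option.map_none, List.filterMap_cons]
        exact ih _
      | some c =>
        simp only [List.foldl_cons, pvInfoE, pvInfo, h, Bool.false_eq_true, if_false,
          Option.map_some, List.filterMap_cons, pvGoB, pvKey]
        by_cases hp : (F.getD (t ++ ":" ++ c) (0, "")).1 = p
        · rw [if_neg (by simp [hp]), if_neg (by simp [hp])]
          exact ih _
        · rw [if_pos (by simp [hp]), if_pos (by simp [hp]), ih]
          simp [pvInfoE, pvInfo]

-- lookup in the pvStepF fold: existing entries win, new keys get their first occurrence
theorem pv_get?_foldF (es : List (Int × (String × String × String)))
    (F0 : PySem.Dict String (Int × String)) (k : String) :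
    (es.foldl pvStepF F0).get? k = (F0.get? k).or (pvFirstOcc es k) := by
  induction es generalizing F0 with
  | nil => simp [pvFirstOcc]
  | cons q tl ih =>
    by_cases hc : F0.contains (pvKey q.2) = true
    · simp only [List.foldl_cons, pvStepF, hc, if_true]
      rw [ih]
      by_cases hk : pvKey q.2 = k
      · subst hk
        rw [PySem.Dict.contains_eq_isSome_get?] at hc
        obtain ⟨v, hv⟩ := Option.isSome_iff_exists.mp hc
        simp [pvFirstOcc, hv]
      · simp [pvFirstOcc, hk]
    · simp only [Bool.not_eq_true] at hc
      simp only [List.foldl_cons, pvStepF, hc, Bool.false_eq_true, if_false]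
      rw [ih]
      by_cases hk : pvKey q.2 = k
      · subst hk
        have h0 : F0.get? (pvKey q.2) = none := by
          rw [PySem.Dict.contains_eq_isSome_get?] at hc
          exact Option.not_isSome_iff_eq_none.mp (by simp [hc])
        simp [pvFirstOcc, h0]
      · simp [PySem.Dict.get?_insert, pvFirstOcc, hk, Ne.symm hk]

-- main correspondence: with the invariant, A's remaining single-pass run equals B's second pass
theorem pv_main (es : List (Int × (String × String × String)))
    (d : PySem.Dict String String) (F : PySem.Dict String (Int × String))
    (hlt : es.Pairwise (fun a b => a.1 < b.1)) (hinv : pvInv d F es) :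
    pvGoA (es.map (·.2)) d = pvGoB F es := by
  induction es generalizing d with
  | nil => simp [pvGoA, pvGoB]
  | cons q tl ih =>
    have hq := hinv (pvKey q.2)
    rw [List.pairwise_cons] at hlt
    cases hd : d.get? (pvKey q.2) with
    | some nm =>
      rw [hd] at hq
      obtain ⟨p0, hF, hne⟩ := hq
      have hcont : d.contains (pvKey q.2) = true := by
        rw [PySem.Dict.contains_eq_isSome_get?, hd]; rfl
      have hgD : d.getD (pvKey q.2) "" = nm := by
        rw [PySem.Dict.getD_eq_get?_getD, hd]; rfl
      have hFgD : F.getD (pvKey q.2) (0, "") = (p0, nm) := by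
        rw [PySem.Dict.getD_eq_get?_getD, hF]; rfl
      have hqp : (F.getD (pvKey q.2) (0, "")).1 ≠ q.1 := by
        rw [hFgD]
        exact fun h => hne q (List.mem_cons_self) rfl (h ▸ rfl)
      simp only [List.map_cons, pvGoA, hcont, if_true, pvGoB, hFgD]
      rw [if_pos (fun h => hqp (by simp [hFgD, h]))]
      refine congrArg₂ _ (by simp [hgD]) ?_
      refine ih d hlt.2 ?_
      intro k
      have := hinv k
      cases hk : d.get? k with
      | some nm' =>
        rw [hk] at this
        obtain ⟨p1, h1, h2⟩ := this
        exact ⟨p1, h1, fun q' hq' => h2 q' (List.mem_cons_of_mem _ hq')⟩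
      | none =>
        rw [hk] at this
        rw [this]
        by_cases hkk : pvKey q.2 = k
        · exfalso
          rw [← hkk, hd] at hk
          simp at hk
        · simp [pvFirstOcc, hkk]
    | none =>
      rw [hd] at hq
      have hfo : pvFirstOcc (q :: tl) (pvKey q.2) = some (q.1, q.2.2.1) := by
        simp [pvFirstOcc]
      rw [hfo] at hq
      have hcont : d.contains (pvKey q.2) = false := by
        rw [PySem.Dict.contains_eq_isSome_get?, hd]; rfl
      have hFgD : F.getD (pvKey q.2) (0, "") = (q.1, q.2.2.1) := by
        rw [PySem.Dict.getD_eq_get?_getD, hq]; rfl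
      simp only [List.map_cons, pvGoA, hcont, Bool.false_eq_true, if_false, pvGoB, hFgD,
        ne_eq, not_true_eq_false]
      refine ih (d.insert (pvKey q.2) q.2.2.1) hlt.2 ?_
      intro k
      by_cases hkk : k = pvKey q.2
      · subst hkk
        rw [PySem.Dict.get?_insert]
        simp only [if_true]
        exact ⟨q.1, hq, fun q' hq' _ h => by
          have := hlt.1 q' hq'
          omega⟩
      · rw [PySem.Dict.get?_insert, if_neg hkk]
        have := hinv k
        cases hk : d.get? k with
        | some nm' =>
          rw [hk] at this
          obtain ⟨p1, h1, h2⟩ := this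
          exact ⟨p1, h1, fun q' hq' => h2 q' (List.mem_cons_of_mem _ hq')⟩
        | none =>
          rw [hk] at this
          rw [this]
          simp only [pvFirstOcc]
          rw [if_neg (fun h => hkk h.symm)]

-- parsed enumerated entries project to the parsed entries
theorem pv_map_snd_filterMap (l : List (String × String × String × String × Bool)) (s : Int) :
    ((PySem.List.enumerate l s).filterMap pvInfoE).map (·.2) = l.filterMap pvInfo := by
  induction l generalizing s with
  | nil => simp [PySem.List.enumerate_nil]
  | cons x tl ih =>
    rw [PySem.List.enumerate_cons, List.filterMap_cons, List.filterMap_cons]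
    cases h : pvInfo x with
    | none =>
      have hh : pvInfoE (s, x) = none := by simp [pvInfoE, h]
      rw [hh]; simpa using ih (s + 1)
    | some y =>
      have hh : pvInfoE (s, x) = some (s, y) := by simp [pvInfoE, h]
      rw [hh]; simpa using ih (s + 1)

-- positions of the parsed enumerated entries are strictly increasing
theorem pv_pairwise_filterMap (l : List (String × String × String × String × Bool)) (s : Int) :
    ((PySem.List.enumerate l s).filterMap pvInfoE).Pairwise (fun a b => a.1 < b.1) := by
  have h := PySem.List.pairwise_lt_enumerate l s
  generalize PySem.List.enumerate l s = E at h ⊢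
  induction E with
  | nil => simp
  | cons q tl ih =>
    rw [List.pairwise_cons] at h
    cases hq : pvInfoE q with
    | none => simpa [hq] using ih h.2
    | some y =>
      rw [List.filterMap_cons, hq, List.pairwise_cons]
      refine ⟨fun b hb => ?_, ih h.2⟩
      obtain ⟨q', hq', hb'⟩ := List.mem_filterMap.mp hb
      have h1 : y.1 = q.1 := by
        simp only [pvInfoE] at hq
        obtain ⟨z, _, hz⟩ := Option.map_eq_some_iff.mp hq
        rw [← hz]
      have h2 : b.1 = q'.1 := by
        simp only [pvInfoE] at hb'
        obtain ⟨z, _, hz⟩ := Option.map_eq_some_iff.mp hb'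
        rw [← hz]
      rw [h1, h2]
      exact h.1 q' hq'

-- ===== VERDICT (by name: the statement is the Claim_ definition above) =====
theorem find_redundant_indexes_spec : Claim_equal_find_redundant_indexes := by
  intro indexes _
  show find_redundant_indexes indexes = find_redundant_indexes_alt indexes
  rw [find_redundant_indexes, find_redundant_indexes_alt]
  rw [pv_foldA_eq, pv_goA_eq, pv_foldF_eq, pv_foldB2_eq]
  rw [List.nil_append, List.nil_append]
  rw [← pv_map_snd_filterMap indexes 0]
  refine pv_main _ PySem.Dict.empty _ (pv_pairwise_filterMap indexes 0) ?_
  intro k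
  rw [PySem.Dict.get?_empty]
  rw [pv_get?_foldF, PySem.Dict.get?_empty, Option.none_or]
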